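-- pv_equiv track=rewrite | github.com/jihoonyou/Problem-Solving | programmers/모의고사.py | solution
-- ===== SOURCE A (Python) =====
-- def solution(answers):
--     answer = []
--     student1 = [1,2,3,4,5]
--     student2 = [2,1,2,3,2,4,2,5]
--     student3 = [3,3,1,1,2,2,4,4,5,5]
--     score = [0]*3
--
--     for index, element in enumerate(answers):
--         if element == student1[index%len(student1)]:
--             score[0] +=1
--         if element == student2[index%len(student2)]:
--             score[1] +=1
--         if element == student3[index%len(student3)]:
--             score[2] +=1
--
--     for i, s in enumerate(score):
--         if s == max(score):
--             answer.append(i+1)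
--     return answer
-- ===== SOURCE B (Python) =====
-- def solution(answers):
--     # Histogram approach: the three patterns all repeat with period dividing 40
--     # (lcm(5,8,10) = 40), so a student's score depends only on how many times each
--     # (index % 40, answer) pair occurs.  Build that histogram in one dict pass,
--     # then each score is a sum of 40 table lookups -- no per-answer pattern compare.
--     counts = {}
--     for i, a in enumerate(answers):
--         key = (i % 40, a)
--         counts[key] = counts.get(key, 0) + 1
--     patterns = [[1, 2, 3, 4, 5],
--                 [2, 1, 2, 3, 2, 4, 2, 5],
--                 [3, 3, 1, 1, 2, 2, 4, 4, 5, 5]]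
--     scores = [sum(counts.get((r, pat[r % len(pat)]), 0) for r in range(40))
--               for pat in patterns]
--     best = max(scores)
--     return [i + 1 for i, s in enumerate(scores) if s == best]
-- ===== Notes on version B (the rewrite author's own statement) =====
-- stated objective: alternative
-- what changed: B replaces A's per-answer comparison against the three cyclic patterns by a histogram: one pass builds a dict counting (index % 40, answer) pairs (40 = lcm of the pattern periods), and each student's score is then the sum of 40 dict lookups, so the pattern comparison disappears from the scan over answers.
import Mathlib
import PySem

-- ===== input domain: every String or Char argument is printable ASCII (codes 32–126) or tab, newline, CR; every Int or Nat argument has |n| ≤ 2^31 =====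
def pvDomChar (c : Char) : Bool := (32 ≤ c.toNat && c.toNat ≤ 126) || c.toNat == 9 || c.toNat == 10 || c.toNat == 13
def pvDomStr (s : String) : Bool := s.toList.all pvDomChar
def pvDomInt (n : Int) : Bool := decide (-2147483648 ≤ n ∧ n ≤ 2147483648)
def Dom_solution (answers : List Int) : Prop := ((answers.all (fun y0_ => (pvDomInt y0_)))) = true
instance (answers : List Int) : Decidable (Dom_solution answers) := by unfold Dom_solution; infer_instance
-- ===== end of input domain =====

-- B scores the students from a histogram of (index % 40, answer) pairs (40 = lcm of
-- the pattern periods) built in one dict pass, instead of A's per-answer comparison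
-- against the three cyclic patterns; objective: alternative algorithm, same cost.

-- ===== PORT A =====
def solution (answers : List Int) : List Int :=
  let student1 : List Int := [1,2,3,4,5]
  let student2 : List Int := [2,1,2,3,2,4,2,5]
  let student3 : List Int := [3,3,1,1,2,2,4,4,5,5]
  -- score = [0]*3, mutated by the three ifs: kept as a triple of counters
  let score : Int × Int × Int :=
    (PySem.List.enumerate answers 0).foldl
      (fun sc p =>
        ((if p.2 = PySem.List.pyGetD student1 (PySem.Int.mod p.1 5) 0 then sc.1 + 1 else sc.1),
         (if p.2 = PySem.List.pyGetD student2 (PySem.Int.mod p.1 8) 0 then sc.2.1 + 1 else sc.2.1),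
         (if p.2 = PySem.List.pyGetD student3 (PySem.Int.mod p.1 10) 0 then sc.2.2 + 1 else sc.2.2)))
      (0, 0, 0)
  let scoreL : List Int := [score.1, score.2.1, score.2.2]
  (PySem.List.enumerate scoreL 0).foldl
    (fun ans p =>
      if p.2 = (PySem.List.max? scoreL (fun x => x)).getD 0 then ans ++ [p.1 + 1] else ans)
    []

-- ===== PORT B =====
-- counts[key] = counts.get(key, 0) + 1 over enumerate(answers), key = (i % 40, a)
def countsB (answers : List Int) : PySem.Dict (Int × Int) Int :=
  (PySem.List.enumerate answers 0).foldl
    (fun d p =>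
      d.insert (PySem.Int.mod p.1 40, p.2) (d.getD (PySem.Int.mod p.1 40, p.2) 0 + 1))
    PySem.Dict.empty

-- sum(counts.get((r, pat[r % len(pat)]), 0) for r in range(40))
def scoreB (cnt : PySem.Dict (Int × Int) Int) (pat : List Int) : Int :=
  ((PySem.List.pyRange 0 40 1).map
    (fun r => cnt.getD (r, PySem.List.pyGetD pat (PySem.Int.mod r (pat.length : Int)) 0) 0)).sum

def solution_alt (answers : List Int) : List Int :=
  let cnt := countsB answers
  let patterns : List (List Int) :=
    [[1,2,3,4,5], [2,1,2,3,2,4,2,5], [3,3,1,1,2,2,4,4,5,5]]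
  let scores : List Int := patterns.map (fun pat => scoreB cnt pat)
  let best : Int := (PySem.List.max? scores (fun x => x)).getD 0
  ((PySem.List.enumerate scores 0).filter (fun p => decide (p.2 = best))).map (fun p => p.1 + 1)

-- ===== PRECONDITION & SPEC =====
def Spec_solution (answers : List Int) (out : List Int) : Prop := out = solution_alt answers
instance (answers : List Int) (out : List Int) : Decidable (Spec_solution answers out) := by unfold Spec_solution; infer_instance

-- ===== CLAIM (what is proved, stated in full; the proofs are below) =====
def Claim_equal_solution : Prop := ∀ (answers : List Int), Dom_solution answers → Spec_solution answers (solution answers)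

-- ===== LEMMAS AND PROOFS =====

-- A's single fold with a triple of independent counters splits into three folds.
theorem foldl_triple_split {α : Type} (q1 q2 q3 : α → Prop)
    [DecidablePred q1] [DecidablePred q2] [DecidablePred q3] (l : List α)
    (a b c : Int) :
    l.foldl (fun (sc : Int × Int × Int) p =>
        ((if q1 p then sc.1 + 1 else sc.1),
         (if q2 p then sc.2.1 + 1 else sc.2.1),
         (if q3 p then sc.2.2 + 1 else sc.2.2))) (a, b, c)
      = (l.foldl (fun s p => if q1 p then s + 1 else s) a,
         l.foldl (fun s p => if q2 p then s + 1 else s) b,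
         l.foldl (fun s p => if q3 p then s + 1 else s) c) := by
  induction l generalizing a b c with
  | nil => rfl
  | cons x xs ih =>
    simp only [List.foldl_cons]
    split_ifs <;> simp [ih]

-- A sum of indicators over a duplicate-free list that contains m picks out the m-term.
theorem sum_ite_pick {R : List Int} (m c : Int) (f : Int → Int)
    (hm : m ∈ R) (hd : R.Nodup) :
    (R.map (fun r => if (m, c) = (r, f r) then (1 : Int) else 0)).sum
      = if f m = c then 1 else 0 := by
  induction R with
  | nil => cases hm
  | cons a R ih =>
    rcases List.mem_cons.mp hm with h | h
    · subst h
      have hnot : m ∉ R := (List.nodup_cons.mp hd).1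
      have hz : (R.map (fun r => if (m, c) = (r, f r) then (1 : Int) else 0)).sum = 0 := by
        apply List.sum_eq_zero
        intro x hx
        rcases List.mem_map.mp hx with ⟨r, hr, rfl⟩
        have hne : ¬ (m, c) = (r, f r) := by
          intro h
          have h1 : m = r := congrArg Prod.fst h
          exact hnot (h1 ▸ hr)
        rw [if_neg hne]
      rw [List.map_cons, List.sum_cons, hz, add_zero]
      by_cases hc : f m = c
      · rw [if_pos (by rw [hc]), if_pos hc]
      · rw [if_neg (fun h => hc (congrArg Prod.snd h).symm), if_neg hc]
    · have ham : ¬ (m, c) = (a, f a) := by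
        intro he
        have h1 : m = a := congrArg Prod.fst he
        exact (List.nodup_cons.mp hd).1 (h1 ▸ h)
      rw [List.map_cons, List.sum_cons, ih h (List.nodup_cons.mp hd).2,
          if_neg ham, zero_add]

-- Bucketing: the count-per-residue sum equals the direct match count, for any f.
theorem bucket_sum (f : Int → Int) (l : List (Int × Int)) :
    ((PySem.List.pyRange 0 40 1).map
        (fun r => ((l.map (fun p => (PySem.Int.mod p.1 40, p.2))).count (r, f r) : Int))).sum
      = (l.countP (fun p => decide (p.2 = f (PySem.Int.mod p.1 40))) : Int) := by
  induction l with
  | nil =>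
    simp only [List.map_nil, List.count_nil, Nat.cast_zero]
    exact List.sum_eq_zero (by intro x hx; rcases List.mem_map.mp hx with ⟨r, _, rfl⟩; rfl)
  | cons x l ih =>
    have hcons : ∀ r : Int,
        (((x :: l).map (fun p => (PySem.Int.mod p.1 40, p.2))).count (r, f r) : Int)
          = ((l.map (fun p => (PySem.Int.mod p.1 40, p.2))).count (r, f r) : Int)
            + (if (PySem.Int.mod x.1 40, x.2) = (r, f r) then 1 else 0) := by
      intro r
      rw [List.map_cons, List.count_cons]
      push_cast
      simp only [beq_iff_eq]
    rw [List.map_congr_left (fun r _ => hcons r)]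
    rw [PySem.List.sum_map_add_int]
    rw [ih, sum_ite_pick (PySem.Int.mod x.1 40) x.2 f
          (by rw [PySem.List.mem_pyRange_one]
              exact ⟨PySem.Int.mod_nonneg _ (by norm_num), PySem.Int.mod_lt _ (by norm_num)⟩)
          (by decide)]
    rw [List.countP_cons]
    push_cast
    by_cases hx : x.2 = f (PySem.Int.mod x.1 40)
    · rw [if_pos hx.symm, if_pos (by rw [decide_eq_true_eq]; exact hx)]
    · rw [if_neg (fun h => hx h.symm), if_neg (by rw [decide_eq_true_eq]; exact hx)]

-- (index % 40) % L = index % L for L ∣ 40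
theorem mod40_mod (i : Int) (L : Int) (hL : 0 < L) (hdvd : L ∣ 40) :
    PySem.Int.mod (PySem.Int.mod i 40) L = PySem.Int.mod i L := by
  simp only [PySem.Int.mod_eq_emod_of_pos hL,
    PySem.Int.mod_eq_emod_of_pos (show (0:Int) < 40 by norm_num)]
  exact Int.emod_emod_of_dvd i hdvd

-- B's histogram score equals A's direct match count, for each fixed pattern.
theorem scoreB_eq (answers : List Int) (pat : List Int) (hlen : 0 < (pat.length : Int))
    (hdvd : (pat.length : Int) ∣ 40) :
    scoreB (countsB answers) pat
      = (PySem.List.enumerate answers 0).foldl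
          (fun s p => if p.2 = PySem.List.pyGetD pat (PySem.Int.mod p.1 (pat.length : Int)) 0
                      then s + 1 else s) 0 := by
  have hdict : countsB answers
      = (((PySem.List.enumerate answers 0).map (fun p => (PySem.Int.mod p.1 40, p.2))).foldl
          (fun d x => d.insert x (d.getD x 0 + 1)) PySem.Dict.empty) := by
    unfold countsB
    rw [List.foldl_map]
  unfold scoreB
  rw [hdict]
  simp only [PySem.Dict.getD_foldl_insert_add_one]
  have hempty : ∀ v : Int × Int, (PySem.Dict.empty : PySem.Dict (Int × Int) Int).getD v 0 = 0 := by
    intro v; rfl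
  simp only [hempty, zero_add]
  rw [bucket_sum (fun r => PySem.List.pyGetD pat (PySem.Int.mod r (pat.length : Int)) 0)]
  rw [PySem.List.foldl_ite_add_one]
  have hP : (PySem.List.enumerate answers 0).countP
        (fun p => decide (p.2 = PySem.List.pyGetD pat
          (PySem.Int.mod (PySem.Int.mod p.1 40) (pat.length : Int)) 0))
      = (PySem.List.enumerate answers 0).countP
        (fun p => decide (p.2 = PySem.List.pyGetD pat (PySem.Int.mod p.1 (pat.length : Int)) 0)) := by
    apply List.countP_congr
    intro p _
    rw [mod40_mod p.1 (pat.length : Int) hlen hdvd]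
  rw [hP]
  simp

-- ===== VERDICT (by name: the statement is the Claim_ definition above) =====
theorem solution_spec : Claim_equal_solution := by
  intro answers _
  unfold Spec_solution solution solution_alt
  dsimp only
  rw [foldl_triple_split (α := Int × Int)
      (fun p => p.2 = PySem.List.pyGetD [1,2,3,4,5] (PySem.Int.mod p.1 5) 0)
      (fun p => p.2 = PySem.List.pyGetD [2,1,2,3,2,4,2,5] (PySem.Int.mod p.1 8) 0)
      (fun p => p.2 = PySem.List.pyGetD [3,3,1,1,2,2,4,4,5,5] (PySem.Int.mod p.1 10) 0)]
  have h1 := scoreB_eq answers [1,2,3,4,5] (by norm_num) (by norm_num)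
  have h2 := scoreB_eq answers [2,1,2,3,2,4,2,5] (by norm_num) (by norm_num)
  have h3 := scoreB_eq answers [3,3,1,1,2,2,4,4,5,5] (by norm_num) (by norm_num)
  simp only [List.length_cons, List.length_nil] at h1 h2 h3
  rw [List.map_cons, List.map_cons, List.map_cons, List.map_nil]
  rw [h1, h2, h3]
  rw [PySem.List.foldl_append_ite]
  rfl
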